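-- pv_equiv track=rewrite | github.com/C2SP/wycheproof | src/keccak_test.py | round_constants_ref
-- ===== SOURCE A (Python) =====
-- def round_constants_ref(w: int) -> list[int]:
--   l = w.bit_length() - 1
--   assert l <= 6
--   rounds = 12 + 2 * l
--   res = [None] * rounds
--   R = 1
--   for rnd in range(rounds):
--     rc = 0
--     for j in range(7):
--       if R & 1 and j <= l:
--         rc ^= (1 << ((1 << j) - 1))
--       R <<= 1
--       if R & 0x100:
--         R ^= 0x171
--     res[rnd] = rc
--   return res
-- ===== SOURCE B (Python) =====
-- def round_constants_ref(w: int) -> list[int]: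
--   l = w.bit_length() - 1
--   assert l <= 6
--
--   def rc(t):
--     # FIPS 202 reference rc(t): run the LFSR t steps from R=1, read the LSB.
--     R = 1
--     for _ in range(t):
--       R <<= 1
--       if R & 0x100:
--         R ^= 0x171
--     return R & 1
--
--   out = []
--   for rnd in range(12 + 2 * l):
--     c = 0
--     for j in range(7):
--       if j <= l and rc(7 * rnd + j):
--         c ^= 1 << ((1 << j) - 1)
--     out.append(c)
--   return out
-- ===== Notes on version B (the rewrite author's own statement) =====
-- stated objective: idiomatic
-- what changed: Replaced the single running LFSR state threaded across all rounds by the FIPS 202 reference stateless rc(t) helper, recomputing each bit from R=1 independently per (round, j).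
import Mathlib
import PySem

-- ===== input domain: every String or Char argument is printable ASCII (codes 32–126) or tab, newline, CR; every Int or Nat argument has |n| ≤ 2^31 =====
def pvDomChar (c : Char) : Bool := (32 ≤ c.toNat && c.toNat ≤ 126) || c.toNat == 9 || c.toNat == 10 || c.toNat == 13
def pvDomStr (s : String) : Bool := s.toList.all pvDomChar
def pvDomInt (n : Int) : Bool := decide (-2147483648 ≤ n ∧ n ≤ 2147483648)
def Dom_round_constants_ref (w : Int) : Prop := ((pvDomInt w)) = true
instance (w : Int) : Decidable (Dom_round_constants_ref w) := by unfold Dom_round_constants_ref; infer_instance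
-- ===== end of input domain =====

-- B replaces A's single running LFSR state by the FIPS 202 reference stateless rc(t) helper (idiomatic; not faster).

-- ===== PORT A =====
-- A's running LFSR state R and the per-round constant rc stay nonnegative, so they are carried as Nat
-- (Python's &, ^, << on nonnegative ints are exactly Nat's &&&, ^^^, <<<).
def round_constants_ref (w : Int) : List Int :=
  let l : Int := (PySem.Int.bitLength w : Int) - 1
  let rounds : Int := 12 + 2 * l
  -- res = [None]*rounds then res[rnd] = rc in ascending rnd order = append in loop order
  (((List.range rounds.toNat).foldl (fun (st : Nat × List Int) (_rnd : Nat) =>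
      let inner := (List.range 7).foldl (fun (p : Nat × Nat) (j : Nat) =>
        let rc := if p.1 &&& 1 ≠ 0 ∧ (j : Int) ≤ l then p.2 ^^^ (1 <<< ((1 <<< j) - 1)) else p.2
        let R := p.1 <<< 1
        let R := if R &&& 0x100 ≠ 0 then R ^^^ 0x171 else R
        (R, rc)) (st.1, 0)
      (inner.1, st.2 ++ [(inner.2 : Int)])) (1, [])).2)

-- ===== PORT B =====
def pvLfsrStep (R : Nat) : Nat :=
  let R := R <<< 1
  if R &&& 0x100 ≠ 0 then R ^^^ 0x171 else R

-- rc(t): run the LFSR t steps from R = 1, read the LSB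
def pvRc (t : Nat) : Nat := (pvLfsrStep^[t] 1) &&& 1

def round_constants_ref_alt (w : Int) : List Int :=
  let l : Int := (PySem.Int.bitLength w : Int) - 1
  (List.range (12 + 2 * l).toNat).foldl (fun (out : List Int) (rnd : Nat) =>
    out ++ [(((List.range 7).foldl (fun (c : Nat) (j : Nat) =>
      if (j : Int) ≤ l ∧ pvRc (7 * rnd + j) ≠ 0 then c ^^^ (1 <<< ((1 <<< j) - 1)) else c) 0 : Nat) : Int)]) []

-- ===== PRECONDITION & SPEC =====
-- Pre_ excludes exactly the inputs on which A's `assert l <= 6` raises AssertionError (|w| ≥ 128).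
def Pre_round_constants_ref (w : Int) : Prop := w.natAbs ≤ 127
instance (w : Int) : Decidable (Pre_round_constants_ref w) := by unfold Pre_round_constants_ref; infer_instance
def pvWitness_round_constants_ref : Int := (64)

def Spec_round_constants_ref (w : Int) (out : List Int) : Prop := out = round_constants_ref_alt w
instance (w : Int) (out : List Int) : Decidable (Spec_round_constants_ref w out) := by unfold Spec_round_constants_ref; infer_instance

-- ===== CLAIM (what is proved, stated in full; the proofs are below) =====
def Claim_equal_round_constants_ref : Prop := ∀ (w : Int), Dom_round_constants_ref w → Pre_round_constants_ref w → Spec_round_constants_ref w (round_constants_ref w)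

-- ===== LEMMAS AND PROOFS =====

-- Under Pre_, Python's bit_length is at most 7.
theorem pv_bitLength_le (w : Int) (h : w.natAbs ≤ 127) : PySem.Int.bitLength w ≤ 7 := by
  by_contra hlt
  push Not at hlt
  have h2 : 2 ^ (PySem.Int.bitLength w - 1) ≤ w.natAbs := by
    apply PySem.Int.two_pow_bitLength_le
    intro h0
    rw [h0] at hlt
    simp [PySem.Int.bitLength_zero] at hlt
  have : (2 : Nat) ^ 7 ≤ 2 ^ (PySem.Int.bitLength w - 1) :=
    Nat.pow_le_pow_right (by norm_num) (by omega)
  omega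

-- Both ports factor through n = bitLength w; with n fixed each side is a closed computation.
theorem pv_eq_of_bitLength (w : Int) (h : PySem.Int.bitLength w ≤ 7) :
    round_constants_ref w = round_constants_ref_alt w := by
  unfold round_constants_ref round_constants_ref_alt
  generalize hn : PySem.Int.bitLength w = n at *
  interval_cases n <;> decide

-- ===== VERDICT (by name: the statement is the Claim_ definition above) =====
theorem round_constants_ref_spec : Claim_equal_round_constants_ref := by
  intro w _ hpre
  exact pv_eq_of_bitLength w (pv_bitLength_le w hpre)
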